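-- pv_equiv track=rewrite | github.com/pypi-data/pypi-mirror-330 | packages/muppy/muppy-1.0.2-py3-none-any.whl/muppy/main.py | preprocessor_compile
-- ===== SOURCE A (Python) =====
-- def find_comment(code, index, style, position):
--     '''
--     Find a comment block in markup/code.
--     '''
--     result = None
--     if style == 'xml':
--         if position == 'start':
--             result = code.find('<!-- (py):', index), 10
--         if position == 'end':
--             result = code.find('-->', index), 3
--     if style == 'c':
--         if position == 'start':
--             result = code.find('/* (py):', index), 8
--         if position == 'end':
--             result = code.find('*/', index), 2
--     if style == 'shell':
--         if position == 'start':
--             result = code.find('# (py):', index), 7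
--         if position == 'end':
--             result = code.find('\n', index), 1
--     if style == 'tex':
--         if position == 'start':
--             result = code.find('% (py):', index), 7
--         if position == 'end':
--             result = code.find('\n', index), 1
--     return result
--
-- def literal_name(number):
--     '''
--     Number to variable name.
--     '''
--     return f'__muppy{hex(number)[2:]}'
--
-- def preprocessor_compile(code, style, placeholder, definitions):
--     '''
--     Compile preprocessor Python code.
--     '''
--     intervals = []
--     index = 0
--     lit_num = 0
--     while True:
--         new_start, tag_len = find_comment(code, index, style, 'start')
--         if new_start != -1:
--             intervals.append({
--                 'type': 'literal',
--                 'content': code[index:new_start],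
--                 'tag': literal_name(lit_num)
--                 })
--             index = new_start + tag_len
--         else:
--             intervals.append({
--                 'type': 'literal',
--                 'content': code[index:len(code)],
--                 'tag': literal_name(lit_num)
--                 })
--             break
--         new_end, tag_len = find_comment(code, index, style, 'end')
--         if new_end != -1:
--             lit_num += 1
--             intervals.append({
--                 'type': 'instruction',
--                 'content': code[index:new_end],
--                 'tag': literal_name(lit_num)
--                 })
--             index = new_end + tag_len
--         else:
--             raise RuntimeError(f'Endless comment at position {index}')
--     literals, instructions = '', ''
--     if definitions is not None:
--         for item in definitions:
--             instructions += f'{item}\n'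
--     for item in intervals:
--         if item['type'] == 'instruction':
--             instructions += item['content'].replace(
--                 placeholder, item["tag"]
--                 ) + '\n'
--         else:
--             literals += f'{item["tag"]} = {repr(item["content"])}\n'
--     return literals + instructions
-- ===== SOURCE B (Python) =====
-- _MARKERS = {
--     'xml': ('<!-- (py):', '-->'),
--     'c': ('/* (py):', '*/'),
--     'shell': ('# (py):', '\n'),
--     'tex': ('% (py):', '\n'),
-- }
--
-- def literal_name(number):
--     '''
--     Number to variable name.
--     '''
--     return f'__muppy{hex(number)[2:]}'
--
-- def preprocessor_compile(code, style, placeholder, definitions):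
--     '''
--     Compile preprocessor Python code (single fused pass, table-driven markers).
--     '''
--     start_tag, end_tag = _MARKERS[style]
--     literals = ''
--     instructions = '' if definitions is None else ''.join(f'{item}\n' for item in definitions)
--     index = 0
--     lit_num = 0
--     while True:
--         start = code.find(start_tag, index)
--         if start == -1:
--             literals += f'{literal_name(lit_num)} = {code[index:]!r}\n'
--             break
--         literals += f'{literal_name(lit_num)} = {code[index:start]!r}\n'
--         index = start + len(start_tag)
--         end = code.find(end_tag, index)
--         if end == -1:
--             raise RuntimeError(f'Endless comment at position {index}')
--         lit_num += 1
--         instructions += code[index:end].replace(placeholder, literal_name(lit_num)) + '\n'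
--         index = end + len(end_tag)
--     return literals + instructions
-- ===== Notes on version B (the rewrite author's own statement) =====
-- stated objective: simpler
-- what changed: B drops the intermediate intervals list of dicts and the find_comment dispatch: it looks the start/end markers up once in a table and emits the literals and instructions strings in a single fused scan of the code.
import Mathlib
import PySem

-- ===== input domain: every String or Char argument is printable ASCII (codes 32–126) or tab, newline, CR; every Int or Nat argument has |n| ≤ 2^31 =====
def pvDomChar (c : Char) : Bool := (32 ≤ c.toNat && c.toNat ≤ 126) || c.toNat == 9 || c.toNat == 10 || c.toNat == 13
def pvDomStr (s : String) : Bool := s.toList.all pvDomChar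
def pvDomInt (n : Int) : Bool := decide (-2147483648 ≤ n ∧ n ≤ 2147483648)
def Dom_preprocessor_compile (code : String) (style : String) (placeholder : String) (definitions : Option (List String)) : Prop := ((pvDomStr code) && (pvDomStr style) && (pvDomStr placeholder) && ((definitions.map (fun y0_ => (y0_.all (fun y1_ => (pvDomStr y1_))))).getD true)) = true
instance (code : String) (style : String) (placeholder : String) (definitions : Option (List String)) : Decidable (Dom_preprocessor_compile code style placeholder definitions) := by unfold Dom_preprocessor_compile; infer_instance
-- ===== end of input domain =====

-- B replaces A's build-an-intervals-list-then-iterate pipeline by a single fused emit pass driven by a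
-- marker table (objective: simpler); return values agree on Pre_ (A raises TypeError / RuntimeError outside it).

-- ===== PORT A =====
-- Port of find_comment: the if-cascade over style/position, returning (find result, tag length); None -> none.
def findComment (cs : List Char) (index : Nat) (style : String) (position : String) : Option (Int × Nat) :=
  if style = "xml" then
    (if position = "start" then some (PySem.Chars.findFrom cs "<!-- (py):".toList (index : Int), 10)
     else if position = "end" then some (PySem.Chars.findFrom cs "-->".toList (index : Int), 3)
     else none)
  else if style = "c" then
    (if position = "start" then some (PySem.Chars.findFrom cs "/* (py):".toList (index : Int), 8)
     else if position = "end" then some (PySem.Chars.findFrom cs "*/".toList (index : Int), 2)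
     else none)
  else if style = "shell" then
    (if position = "start" then some (PySem.Chars.findFrom cs "# (py):".toList (index : Int), 7)
     else if position = "end" then some (PySem.Chars.findFrom cs "\n".toList (index : Int), 1)
     else none)
  else if style = "tex" then
    (if position = "start" then some (PySem.Chars.findFrom cs "% (py):".toList (index : Int), 7)
     else if position = "end" then some (PySem.Chars.findFrom cs "\n".toList (index : Int), 1)
     else none)
  else none

lemma findFrom_step (cs sub : List Char) (k : Nat) (hk : k ≤ cs.length) (hsub : sub ≠ [])
    (h : PySem.Chars.findFrom cs sub (k : Int) ≠ -1) :
    k ≤ (PySem.Chars.findFrom cs sub (k : Int)).toNat ∧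
      (PySem.Chars.findFrom cs sub (k : Int)).toNat + sub.length ≤ cs.length := by
  obtain ⟨h1, h2, -⟩ := PySem.Chars.findFrom_natCast_spec cs sub k hk h
  have h3 := h2.length_le
  have h4 : 0 < sub.length := List.length_pos_iff.mpr hsub
  simp only [List.length_drop] at h3
  omega

lemma findComment_spec (cs : List Char) (style position : String) (k : Nat) (hk : k ≤ cs.length)
    (r : Int) (tl : Nat) (hr : findComment cs k style position = some (r, tl)) (hne : ¬ r = -1) :
    k ≤ r.toNat ∧ r.toNat + tl ≤ cs.length ∧ 1 ≤ tl := by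
  unfold findComment at hr
  split_ifs at hr <;>
    first
    | · simp only [Option.some.injEq, Prod.mk.injEq] at hr
        obtain ⟨h1, h2⟩ := hr
        subst h1; subst h2
        have hL : (("<!-- (py):".toList).length = 10 ∧ ("-->".toList).length = 3 ∧
          ("/* (py):".toList).length = 8 ∧ ("*/".toList).length = 2 ∧
          ("# (py):".toList).length = 7 ∧ ("\n".toList).length = 1 ∧
          ("% (py):".toList).length = 7) := by decide
        have := findFrom_step cs _ k hk (by decide) hne
        omega
    | exact Option.noConfusion hr

-- repr / literal_name helpers
def literalNameChars (n : Nat) : List Char := "__muppy".toList ++ Nat.toDigits 16 n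

def pyReprChars (cs : List Char) : List Char :=
  let q : Char := if cs.contains '\'' && !cs.contains '"' then '"' else '\''
  [q] ++ (cs.flatMap (fun c =>
    if c = '\\' then ['\\', '\\']
    else if c = q then ['\\', q]
    else if c = '\n' then ['\\', 'n']
    else if c = '\r' then ['\\', 'r']
    else if c = '\t' then ['\\', 't']
    else [c])) ++ [q]

inductive Iv where
  | lit (content tag : List Char)
  | instr (content tag : List Char)
deriving DecidableEq, Repr

def loopA (cs : List Char) (style : String) (index litNum : Nat) (hk : index ≤ cs.length)
    (acc : List Iv) : Option (List Iv) :=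
  match hs : findComment cs index style "start" with
  | none => none
  | some (ns, tlS) =>
    if hns : ¬ ns = -1 then
      have hb := findComment_spec cs style "start" index hk ns tlS hs hns
      let acc1 := acc ++ [Iv.lit (PySem.List.slice cs (some (index : Int)) (some ns)) (literalNameChars litNum)]
      match he : findComment cs (ns.toNat + tlS) style "end" with
      | none => none
      | some (ne, tlE) =>
        if hne : ¬ ne = -1 then
          have hb2 := findComment_spec cs style "end" (ns.toNat + tlS) hb.2.1 ne tlE he hne
          loopA cs style (ne.toNat + tlE) (litNum + 1) hb2.2.1
            (acc1 ++ [Iv.instr (PySem.List.slice cs (some ((ns.toNat + tlS : Nat) : Int)) (some ne)) (literalNameChars (litNum + 1))])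
        else none
    else some (acc ++ [Iv.lit (PySem.List.slice cs (some (index : Int)) (some (cs.length : Int))) (literalNameChars litNum)])
termination_by cs.length + 1 - index
decreasing_by omega

-- literal_name(n) = '__muppy' + hex(n)[2:]; hex(n)[2:] for n >= 0 is Nat.toDigits 16 n.
-- (shared by both ports: both Pythons call the same module helper literal_name / builtin repr)

-- repr(s): exact for strings of printable ASCII plus tab/newline/CR (the Dom character set).

def emitStep (ph : List Char) (p : List Char × List Char) (iv : Iv) : List Char × List Char :=
  match iv with
  | .instr c t => (p.1, p.2 ++ PySem.Chars.replace c ph t ++ ['\n'])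
  | .lit c t => (p.1 ++ t ++ " = ".toList ++ pyReprChars c ++ ['\n'], p.2)

def preprocessor_compile (code : String) (style : String) (placeholder : String)
    (definitions : Option (List String)) : String :=
  match loopA code.toList style 0 0 (Nat.zero_le _) [] with
  | none => ""  -- A raises here (TypeError on unknown style / RuntimeError on endless comment); outside Pre_
  | some intervals =>
    let instructions0 : List Char :=
      match definitions with
      | none => []
      | some defs => defs.foldl (fun acc item => acc ++ item.toList ++ ['\n']) []
    let p := intervals.foldl (emitStep placeholder.toList) ([], instructions0)
    String.ofList (p.1 ++ p.2)

-- ===== PORT B =====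
def markersOf (style : String) : Option (String × String) :=
  if style = "xml" then some ("<!-- (py):", "-->")
  else if style = "c" then some ("/* (py):", "*/")
  else if style = "shell" then some ("# (py):", "\n")
  else if style = "tex" then some ("% (py):", "\n")
  else none

lemma markersOf_nonempty (style : String) (sT eT : String) (hm : markersOf style = some (sT, eT)) :
    sT.toList ≠ [] ∧ eT.toList ≠ [] := by
  unfold markersOf at hm
  split_ifs at hm <;>
    first
    | (simp only [Option.some.injEq, Prod.mk.injEq] at hm; obtain ⟨h1, h2⟩ := hm; subst h1; subst h2; decide)
    | exact Option.noConfusion hm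

def loopB (cs sTag eTag ph : List Char) (index litNum : Nat) (hk : index ≤ cs.length)
    (hsT : sTag ≠ []) (heT : eTag ≠ []) (lits instrs : List Char) : Option (List Char × List Char) :=
  let s := PySem.Chars.findFrom cs sTag (index : Int)
  if hfs : s = -1 then
    some (lits ++ literalNameChars litNum ++ " = ".toList ++ pyReprChars (cs.drop index) ++ ['\n'], instrs)
  else
    have h1 := findFrom_step cs sTag index hk hsT hfs
    have hsl : 0 < sTag.length := List.length_pos_iff.mpr hsT
    have hel : 0 < eTag.length := List.length_pos_iff.mpr heT
    let lits' := lits ++ literalNameChars litNum ++ " = ".toList ++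
      pyReprChars (PySem.List.slice cs (some (index : Int)) (some s)) ++ ['\n']
    let e := PySem.Chars.findFrom cs eTag ((s.toNat + sTag.length : Nat) : Int)
    if hfe : e = -1 then none  -- B raises RuntimeError here; outside Pre_
    else
      have h2 := findFrom_step cs eTag (s.toNat + sTag.length) h1.2 heT hfe
      loopB cs sTag eTag ph (e.toNat + eTag.length) (litNum + 1) h2.2 hsT heT
        lits' (instrs ++ PySem.Chars.replace (PySem.List.slice cs (some ((s.toNat + sTag.length : Nat) : Int)) (some e)) ph (literalNameChars (litNum + 1)) ++ ['\n'])
termination_by cs.length + 1 - index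
decreasing_by simp only [s] at *; omega

def preprocessor_compile_alt (code : String) (style : String) (placeholder : String)
    (definitions : Option (List String)) : String :=
  match hm : markersOf style with
  | none => ""  -- B raises KeyError here; outside Pre_
  | some (sT, eT) =>
    let instructions0 : List Char :=
      match definitions with
      | none => []
      | some defs => defs.flatMap (fun item => item.toList ++ ['\n'])
    match loopB code.toList sT.toList eT.toList placeholder.toList 0 0 (Nat.zero_le _)
        (markersOf_nonempty style sT eT hm).1 (markersOf_nonempty style sT eT hm).2 [] instructions0 with
    | none => ""  -- RuntimeError path; outside Pre_
    | some (l, i) => String.ofList (l ++ i)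

-- ===== PRECONDITION & SPEC =====
def startTagOf (style : String) : List Char :=
  if style = "xml" then "<!-- (py):".toList
  else if style = "c" then "/* (py):".toList
  else if style = "shell" then "# (py):".toList
  else "% (py):".toList

def endTagOf (style : String) : List Char :=
  if style = "xml" then "-->".toList
  else if style = "c" then "*/".toList
  else "\n".toList

-- Pre_ excludes the styles A's find_comment does not know (A raises TypeError unpacking None) and inputs with
-- an unterminated preprocessor comment (A raises RuntimeError); the occurrence-based termination test is slightly
-- conservative: in 'c' style a '*/' overlapping a '/*' start tag can let A return on an input Pre_ excludes,
-- and A and B return the same value there.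
def Pre_preprocessor_compile (code : String) (style : String) (placeholder : String)
    (definitions : Option (List String)) : Prop :=
  (style = "xml" ∨ style = "c" ∨ style = "shell" ∨ style = "tex") ∧
  ∀ p < code.toList.length, startTagOf style <+: code.toList.drop p →
    ∃ e < code.toList.length, p ≤ e ∧ endTagOf style <+: code.toList.drop e

instance (code : String) (style : String) (placeholder : String) (definitions : Option (List String)) :
    Decidable (Pre_preprocessor_compile code style placeholder definitions) := by
  unfold Pre_preprocessor_compile; infer_instance

def pvWitness_preprocessor_compile : String × String × String × Option (List String) :=
  ("a<!-- (py): x -->b", "xml", "x", some ["import os"])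

def Spec_preprocessor_compile (code : String) (style : String) (placeholder : String) (definitions : Option (List String)) (out : String) : Prop := out = preprocessor_compile_alt code style placeholder definitions
instance (code : String) (style : String) (placeholder : String) (definitions : Option (List String)) (out : String) : Decidable (Spec_preprocessor_compile code style placeholder definitions out) := by unfold Spec_preprocessor_compile; infer_instance

-- ===== CLAIM (what is proved, stated in full; the proofs are below) =====
def Claim_equal_preprocessor_compile : Prop := ∀ (code : String) (style : String) (placeholder : String) (definitions : Option (List String)), Dom_preprocessor_compile code style placeholder definitions → Pre_preprocessor_compile code style placeholder definitions → Spec_preprocessor_compile code style placeholder definitions (preprocessor_compile code style placeholder definitions)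

-- ===== LEMMAS AND PROOFS =====
lemma emit_factor (ph : List Char) (ivs : List Iv) (l i : List Char) :
    List.foldl (emitStep ph) (l, i) ivs =
      (l ++ (List.foldl (emitStep ph) ([], []) ivs).1, i ++ (List.foldl (emitStep ph) ([], []) ivs).2) := by
  induction ivs generalizing l i with
  | nil => simp
  | cons iv rest IH =>
    cases iv with
    | lit c t =>
      simp only [List.foldl_cons, emitStep]
      rw [IH, IH ([] ++ t ++ " = ".toList ++ pyReprChars c ++ ['\n']) []]
      simp
    | instr c t =>
      simp only [List.foldl_cons, emitStep]
      rw [IH, IH [] ([] ++ PySem.Chars.replace c ph t ++ ['\n'])]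
      simp

lemma loopA_acc (cs : List Char) (style : String) :
    ∀ (n index litNum : Nat) (hk : index ≤ cs.length) (acc : List Iv),
      cs.length + 1 - index ≤ n →
      loopA cs style index litNum hk acc = (loopA cs style index litNum hk []).map (fun ivs => acc ++ ivs) := by
  intro n
  induction n with
  | zero => intro index _ hk _ hn; omega
  | succ n IH =>
    intro index litNum hk acc hn
    rw [loopA.eq_def]
    conv_rhs => rw [loopA.eq_def]
    split
    · rfl
    · rename_i ns tlS hA
      by_cases hns : ns = (-1 : Int)
      · simp only [dif_neg (not_not_intro hns)]
        simp
      · simp only [dif_pos hns]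
        split
        · rfl
        · rename_i ne tlE hE
          by_cases hne : ne = (-1 : Int)
          · simp only [dif_neg (not_not_intro hne)]
            simp
          · simp only [dif_pos hne]
            have hb := findComment_spec cs style "start" index hk ns tlS hA hns
            have hb2 := findComment_spec cs style "end" (ns.toNat + tlS) (by omega) ne tlE hE hne
            conv_lhs => rw [IH _ _ _ _ (by omega)]
            conv_rhs => rw [IH _ _ _ _ (by omega)]
            simp only [Option.map_map]
            congr 1
            funext ivs
            simp


lemma loopB_eq_loopA (cs ph : List Char) (style : String) (sTag eTag : List Char)
    (hsT : sTag ≠ []) (heT : eTag ≠ [])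
    (Hs : ∀ k : Nat, findComment cs k style "start" = some (PySem.Chars.findFrom cs sTag (k : Int), sTag.length))
    (He : ∀ k : Nat, findComment cs k style "end" = some (PySem.Chars.findFrom cs eTag (k : Int), eTag.length)) :
    ∀ (n index litNum : Nat) (hk : index ≤ cs.length) (lits instrs : List Char),
      cs.length + 1 - index ≤ n →
      loopB cs sTag eTag ph index litNum hk hsT heT lits instrs =
        (loopA cs style index litNum hk []).map
          (fun ivs => (lits ++ (ivs.foldl (emitStep ph) ([], [])).1,
                       instrs ++ (ivs.foldl (emitStep ph) ([], [])).2)) := by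
  intro n
  induction n with
  | zero => intro index _ hk _ _ hn; omega
  | succ n IH =>
    intro index litNum hk lits instrs hn
    conv_rhs => rw [loopA.eq_def]
    split
    · rename_i hA; rw [Hs index] at hA; simp at hA
    · rename_i ns tlS hA
      rw [Hs index] at hA
      simp only [Option.some.injEq, Prod.mk.injEq] at hA
      obtain ⟨h1, h2⟩ := hA
      subst h1; subst h2
      rw [loopB.eq_def]
      simp only []
      by_cases hfs : PySem.Chars.findFrom cs sTag (index : Int) = -1
      · rw [dif_pos hfs, dif_neg (not_not_intro hfs)]
        simp only [Option.map_some, List.foldl_cons, List.foldl_nil, emitStep, List.nil_append]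
        rw [PySem.List.slice_natCast]
        rw [List.take_of_length_le (by simp)]
        simp
      · rw [dif_neg hfs, dif_pos hfs]
        split
        · -- loopB's end-find failed: RuntimeError on both sides
          rename_i hE
          split
          · rfl
          · rename_i ne tlE hE2
            rw [He] at hE2
            simp only [Option.some.injEq, Prod.mk.injEq] at hE2
            obtain ⟨h1, h2⟩ := hE2
            subst h1; subst h2
            rw [dif_neg (not_not_intro hE)]
            rfl
        · rename_i hE
          split
          · rename_i hE2; rw [He] at hE2; simp at hE2
          · rename_i ne tlE hE2
            rw [He] at hE2
            simp only [Option.some.injEq, Prod.mk.injEq] at hE2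
            obtain ⟨h1, h2⟩ := hE2
            subst h1; subst h2
            rw [dif_pos hE]
            have hb := findFrom_step cs sTag index hk hsT hfs
            have hsl : 0 < sTag.length := List.length_pos_iff.mpr hsT
            have hel : 0 < eTag.length := List.length_pos_iff.mpr heT
            have hb2 := findFrom_step cs eTag ((PySem.Chars.findFrom cs sTag (index : Int)).toNat + sTag.length)
              (by omega) heT hE
            conv_rhs => rw [loopA_acc cs style (cs.length + 1) _ _ _ _ (by omega)]
            conv_lhs => rw [IH _ _ _ _ _ (by omega)]
            simp only [Option.map_map]
            congr 1
            funext ivs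
            simp only [Function.comp, List.nil_append, List.cons_append, List.foldl_cons]
            simp only [emitStep]
            conv_rhs => rw [emit_factor ph ivs]
            simp [List.append_assoc]

lemma bridge_xml_start (cs : List Char) (k : Nat) :
    findComment cs k "xml" "start" =
      some (PySem.Chars.findFrom cs "<!-- (py):".toList (k : Int), ("<!-- (py):".toList).length) := by
  unfold findComment
  rw [if_pos rfl, if_pos rfl, show ("<!-- (py):".toList).length = 10 from by decide]

lemma bridge_xml_end (cs : List Char) (k : Nat) :
    findComment cs k "xml" "end" =
      some (PySem.Chars.findFrom cs "-->".toList (k : Int), ("-->".toList).length) := by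
  unfold findComment
  rw [if_pos rfl, if_neg (by decide), if_pos rfl, show ("-->".toList).length = 3 from by decide]

lemma bridge_c_start (cs : List Char) (k : Nat) :
    findComment cs k "c" "start" =
      some (PySem.Chars.findFrom cs "/* (py):".toList (k : Int), ("/* (py):".toList).length) := by
  unfold findComment
  rw [if_neg (by decide), if_pos rfl, if_pos rfl, show ("/* (py):".toList).length = 8 from by decide]

lemma bridge_c_end (cs : List Char) (k : Nat) :
    findComment cs k "c" "end" =
      some (PySem.Chars.findFrom cs "*/".toList (k : Int), ("*/".toList).length) := by
  unfold findComment
  rw [if_neg (by decide), if_pos rfl, if_neg (by decide), if_pos rfl,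
    show ("*/".toList).length = 2 from by decide]

lemma bridge_shell_start (cs : List Char) (k : Nat) :
    findComment cs k "shell" "start" =
      some (PySem.Chars.findFrom cs "# (py):".toList (k : Int), ("# (py):".toList).length) := by
  unfold findComment
  rw [if_neg (by decide), if_neg (by decide), if_pos rfl, if_pos rfl,
    show ("# (py):".toList).length = 7 from by decide]

lemma bridge_shell_end (cs : List Char) (k : Nat) :
    findComment cs k "shell" "end" =
      some (PySem.Chars.findFrom cs "\n".toList (k : Int), ("\n".toList).length) := by
  unfold findComment
  rw [if_neg (by decide), if_neg (by decide), if_pos rfl, if_neg (by decide), if_pos rfl,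
    show ("\n".toList).length = 1 from by decide]

lemma bridge_tex_start (cs : List Char) (k : Nat) :
    findComment cs k "tex" "start" =
      some (PySem.Chars.findFrom cs "% (py):".toList (k : Int), ("% (py):".toList).length) := by
  unfold findComment
  rw [if_neg (by decide), if_neg (by decide), if_neg (by decide), if_pos rfl, if_pos rfl,
    show ("% (py):".toList).length = 7 from by decide]

lemma bridge_tex_end (cs : List Char) (k : Nat) :
    findComment cs k "tex" "end" =
      some (PySem.Chars.findFrom cs "\n".toList (k : Int), ("\n".toList).length) := by
  unfold findComment
  rw [if_neg (by decide), if_neg (by decide), if_neg (by decide), if_pos rfl, if_neg (by decide),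
    if_pos rfl, show ("\n".toList).length = 1 from by decide]

lemma alt_eq (code style placeholder : String) (definitions : Option (List String))
    (sT eT : String) (hm : markersOf style = some (sT, eT))
    (h1 : sT.toList ≠ []) (h2 : eT.toList ≠ []) :
    preprocessor_compile_alt code style placeholder definitions =
      match loopB code.toList sT.toList eT.toList placeholder.toList 0 0 (Nat.zero_le _) h1 h2 []
        (match definitions with
         | none => []
         | some defs => defs.flatMap (fun item => item.toList ++ ['\n'])) with
      | none => ""
      | some (l, i) => String.ofList (l ++ i) := by
  unfold preprocessor_compile_alt
  split
  · next heq => rw [heq] at hm; simp at hm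
  · next sT' eT' heq =>
    rw [heq] at hm
    simp only [Option.some.injEq, Prod.mk.injEq] at hm
    obtain ⟨h1', h2'⟩ := hm
    subst h1'; subst h2'
    rfl

lemma assemble_valid (code style placeholder : String) (definitions : Option (List String))
    (sT eT : String) (hm : markersOf style = some (sT, eT))
    (Hs : ∀ k : Nat, findComment code.toList k style "start" =
      some (PySem.Chars.findFrom code.toList sT.toList (k : Int), sT.toList.length))
    (He : ∀ k : Nat, findComment code.toList k style "end" =
      some (PySem.Chars.findFrom code.toList eT.toList (k : Int), eT.toList.length)) :
    preprocessor_compile code style placeholder definitions =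
      preprocessor_compile_alt code style placeholder definitions := by
  rw [alt_eq code style placeholder definitions sT eT hm
    ((markersOf_nonempty _ _ _ hm).1) ((markersOf_nonempty _ _ _ hm).2)]
  rw [loopB_eq_loopA code.toList placeholder.toList style sT.toList eT.toList _ _ Hs He
    (code.toList.length + 1) 0 0 _ _ _ (by omega)]
  unfold preprocessor_compile
  cases hL : loopA code.toList style 0 0 (Nat.zero_le _) [] with
  | none => rfl
  | some ivs =>
    simp only [Option.map_some]
    rw [emit_factor]
    cases definitions with
    | none => simp
    | some ds => simp [List.flatMap, List.append_assoc]

theorem ab_eq (code style placeholder : String) (definitions : Option (List String)) :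
    preprocessor_compile code style placeholder definitions =
      preprocessor_compile_alt code style placeholder definitions := by
  by_cases h1 : style = "xml"
  · subst h1
    exact assemble_valid _ _ _ _ _ _ rfl (bridge_xml_start code.toList) (bridge_xml_end code.toList)
  by_cases h2 : style = "c"
  · subst h2
    exact assemble_valid _ _ _ _ _ _ rfl (bridge_c_start code.toList) (bridge_c_end code.toList)
  by_cases h3 : style = "shell"
  · subst h3
    exact assemble_valid _ _ _ _ _ _ rfl (bridge_shell_start code.toList) (bridge_shell_end code.toList)
  by_cases h4 : style = "tex"
  · subst h4
    exact assemble_valid _ _ _ _ _ _ rfl (bridge_tex_start code.toList) (bridge_tex_end code.toList)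
  · -- unknown style: both ports return ""
    have hA : findComment code.toList 0 style "start" = none := by
      unfold findComment
      rw [if_neg h1, if_neg h2, if_neg h3, if_neg h4]
    have hM : markersOf style = none := by
      unfold markersOf
      rw [if_neg h1, if_neg h2, if_neg h3, if_neg h4]
    have hLA : loopA code.toList style 0 0 (Nat.zero_le _) [] = none := by
      rw [loopA.eq_def]
      split
      · rfl
      · rename_i ns tlS heq; rw [hA] at heq; simp at heq
    unfold preprocessor_compile preprocessor_compile_alt
    rw [hLA]
    split
    · split
      · rfl
      · rename_i sT eT heq; rw [hM] at heq; simp at heq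
    · rename_i heq; simp at heq

-- ===== VERDICT (by name: the statement is the Claim_ definition above) =====
theorem preprocessor_compile_spec : Claim_equal_preprocessor_compile := by
  intro code style placeholder definitions _ _
  exact ab_eq code style placeholder definitions
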